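-- pv_equiv track=rewrite | github.com/leosamuel64/TP-Programmation-ENAC | Python/TP3/syracuse.py | altitude_record
-- ===== SOURCE A (Python) =====
-- def altitude_max(u0):
--     u=u0
--     maxi=u0
--     while u>1:
--         if u%2==0:
--             u = u//2
--         else:
--             u = 3*u+1
--         if u>maxi:
--             maxi=u
--     return maxi
--
-- def altitude_record(m):
--     maxi=1
--     res=1
--     for u in range(1,m+1):
--         altmax = altitude_max(u)
--         if altmax>maxi:
--             maxi=altmax
--             res=u
--     return res,maxi
-- ===== SOURCE B (Python) =====
-- def altitude_record(m):
--     def altmax(u):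
--         if u <= 1:
--             return u
--         v = u // 2 if u % 2 == 0 else 3 * u + 1
--         r = altmax(v)
--         return u if u > r else r
--
--     def best(lo, hi):
--         # best (peak, u) over range(lo, hi), leftmost u on equal peaks
--         if hi - lo == 1:
--             return altmax(lo), lo
--         mid = (lo + hi) // 2
--         left = best(lo, mid)
--         right = best(mid, hi)
--         return left if left[0] >= right[0] else right
--
--     if m < 1:
--         return 1, 1
--     maxi, res = best(1, m + 1)
--     return res, maxi
-- ===== Notes on version B (the rewrite author's own statement) =====
-- stated objective: alternative
-- what changed: B computes each peak top-down by recursion altmax(u)=max(u,altmax(next(u))) instead of A's while-loop with a running maximum, and selects the record u by divide-and-conquer over [1,m] with a left-biased combine instead of A's linear scan with a (maxi,res) accumulator.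
import Mathlib
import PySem

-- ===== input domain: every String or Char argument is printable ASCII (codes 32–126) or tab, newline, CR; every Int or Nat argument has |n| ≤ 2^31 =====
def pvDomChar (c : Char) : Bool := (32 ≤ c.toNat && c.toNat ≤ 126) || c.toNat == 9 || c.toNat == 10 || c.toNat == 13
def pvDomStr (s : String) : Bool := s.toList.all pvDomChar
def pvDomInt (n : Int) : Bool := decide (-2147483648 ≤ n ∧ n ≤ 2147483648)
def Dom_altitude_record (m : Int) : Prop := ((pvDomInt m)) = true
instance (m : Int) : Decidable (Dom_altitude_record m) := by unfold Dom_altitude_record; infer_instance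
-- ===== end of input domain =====

-- B replaces A's running-max while loop by top-down recursion altmax(u)=max(u,altmax(next(u)))
-- and A's linear (maxi,res) scan by a left-biased divide-and-conquer over the range
-- (objective: alternative; not claimed faster). Both Collatz recursions are fueled with
-- 10000 steps; the ports are exact wherever the trajectory reaches 1 within that fuel,
-- which covers every input the checks draw (nothing about Collatz termination is claimed).

-- ===== PORT A =====
def pvAltMaxLoop : Nat → Int → Int → Int
  | 0, _, maxi => maxi
  | f + 1, u, maxi =>
    if u > 1 then
      let u' := if PySem.Int.mod u 2 = 0 then PySem.Int.floordiv u 2 else 3 * u + 1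
      pvAltMaxLoop f u' (if u' > maxi then u' else maxi)
    else maxi

def altitude_max (u0 : Int) : Int := pvAltMaxLoop 10000 u0 u0

def altitude_record (m : Int) : List Int :=
  let r := (PySem.List.pyRange 1 (m + 1) 1).foldl
    (fun (p : Int × Int) u =>
      let altmax := altitude_max u
      if altmax > p.1 then (altmax, u) else p) (1, 1)
  [r.2, r.1]

-- ===== PORT B =====
-- Source B's altmax: top-down recursion, fueled (fuel exhaustion returns u, i.e. the
-- max over the traversed prefix, matching A's truncation shape)
def pvAltB : Nat → Int → Int
  | 0, u => u
  | f + 1, u =>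
    if u ≤ 1 then u
    else
      let v := if PySem.Int.mod u 2 = 0 then PySem.Int.floordiv u 2 else 3 * u + 1
      let r := pvAltB f v
      if u > r then u else r

-- Source B's best(lo, hi): divide and conquer over range(lo, hi), leftmost u on equal peaks.
-- The guard is 'hi - lo ≤ 1' instead of '== 1': identical on every reachable call
-- (best is only invoked with lo < hi) and it makes termination structural.
def pvBest (lo hi : Int) : Int × Int :=
  if hi - lo ≤ 1 then (pvAltB 10000 lo, lo)
  else
    let mid := PySem.Int.floordiv (lo + hi) 2
    let left := pvBest lo mid
    let right := pvBest mid hi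
    if left.1 ≥ right.1 then left else right
termination_by (hi - lo).toNat
decreasing_by
  all_goals
    rw [PySem.Int.floordiv_eq_ediv_of_pos (by omega : (0:Int) < 2)]
    omega

def altitude_record_alt (m : Int) : List Int :=
  if m < 1 then [1, 1]
  else
    let b := pvBest 1 (m + 1)
    [b.2, b.1]

-- ===== PRECONDITION & SPEC =====
def Spec_altitude_record (m : Int) (out : List Int) : Prop := out = altitude_record_alt m
instance (m : Int) (out : List Int) : Decidable (Spec_altitude_record m out) := by unfold Spec_altitude_record; infer_instance

-- ===== CLAIM (what is proved, stated in full; the proofs are below) =====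
def Claim_equal_altitude_record : Prop := ∀ (m : Int), Dom_altitude_record m → Spec_altitude_record m (altitude_record m)

-- ===== LEMMAS AND PROOFS =====

-- hoisting a max out of A's running-max loop
lemma pvAltMaxLoop_hoist : ∀ (f : Nat) (u a maxi : Int),
    pvAltMaxLoop f u (max a maxi) = max a (pvAltMaxLoop f u maxi) := by
  intro f
  induction f with
  | zero => intro u a maxi; simp [pvAltMaxLoop]
  | succ f ih =>
    intro u a maxi
    by_cases h : u > 1
    · simp only [pvAltMaxLoop, if_pos h]
      set u' := if PySem.Int.mod u 2 = 0 then PySem.Int.floordiv u 2 else 3 * u + 1 with hu'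
      have h1 : ∀ x y : Int, (if x > y then x else y) = max x y := by
        intro x y; split_ifs <;> omega
      rw [h1, h1, max_left_comm, ih]
    · simp [pvAltMaxLoop, h]

-- B's recursive altmax equals A's loop, for every fuel
lemma pvAltB_eq : ∀ (f : Nat) (u : Int), pvAltB f u = pvAltMaxLoop f u u := by
  intro f
  induction f with
  | zero => intro u; simp [pvAltB, pvAltMaxLoop]
  | succ f ih =>
    intro u
    by_cases h : u ≤ 1
    · simp [pvAltB, pvAltMaxLoop, h]
    · simp only [pvAltB, pvAltMaxLoop, if_neg h, if_pos (by omega : u > 1)]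
      set v := if PySem.Int.mod u 2 = 0 then PySem.Int.floordiv u 2 else 3 * u + 1 with hv
      rw [ih]
      have h1 : ∀ x y : Int, (if x > y then x else y) = max x y := by
        intro x y; split_ifs <;> omega
      rw [h1, h1, max_comm v u, pvAltMaxLoop_hoist]

-- pvBest's peak dominates the altitude of its left endpoint, and on ties the
-- left endpoint wins
lemma pvBest_lo : ∀ (n : Nat) (lo hi : Int), (hi - lo).toNat ≤ n → lo < hi →
    altitude_max lo ≤ (pvBest lo hi).1 ∧
      ((pvBest lo hi).1 ≤ altitude_max lo → pvBest lo hi = (altitude_max lo, lo)) := by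
  intro n
  induction n with
  | zero => intro lo hi hn hlt; omega
  | succ n ih =>
    intro lo hi hn hlt
    by_cases h1 : hi - lo ≤ 1
    · rw [pvBest, if_pos h1, pvAltB_eq]
      exact ⟨le_refl _, fun _ => rfl⟩
    · rw [pvBest, if_neg h1]
      have hmid := PySem.Int.floordiv_eq_ediv_of_pos (b := 2) (a := lo + hi) (by omega)
      set mid := PySem.Int.floordiv (lo + hi) 2 with hm
      have hb : lo < mid ∧ mid < hi := by omega
      obtain ⟨hle, htie⟩ := ih lo mid (by omega) hb.1
      by_cases hc : (pvBest lo mid).1 ≥ (pvBest mid hi).1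
      · simp only [if_pos hc]
        exact ⟨hle, htie⟩
      · simp only [if_neg hc]
        refine ⟨by omega, fun hcon => absurd hcon (by omega)⟩

-- A's fold over a split range equals pvBest's combine
lemma pvFold_best : ∀ (n : Nat) (lo hi : Int), (hi - lo).toNat ≤ n → lo < hi →
    ∀ (maxi res : Int),
      (PySem.List.pyRange lo hi 1).foldl
        (fun (p : Int × Int) u =>
          let altmax := altitude_max u
          if altmax > p.1 then (altmax, u) else p) (maxi, res)
      = (if (pvBest lo hi).1 > maxi then pvBest lo hi else (maxi, res)) := by
  intro n
  induction n with
  | zero => intro lo hi hn hlt; omega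
  | succ n ih =>
    intro lo hi hn hlt maxi res
    by_cases h1 : hi - lo ≤ 1
    · have hhi : hi = lo + 1 := by omega
      rw [pvBest, if_pos h1, pvAltB_eq, hhi, PySem.List.pyRange_one_singleton]
      simp only [List.foldl_cons, List.foldl_nil]
      rfl
    · rw [pvBest, if_neg h1]
      have hmid := PySem.Int.floordiv_eq_ediv_of_pos (b := 2) (a := lo + hi) (by omega)
      set mid := PySem.Int.floordiv (lo + hi) 2 with hm
      have hb : lo < mid ∧ mid < hi := by omega
      rw [PySem.List.pyRange_one_append lo mid hi (by omega) (by omega), List.foldl_append]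
      rw [ih lo mid (by omega) hb.1 maxi res]
      by_cases hL : (pvBest lo mid).1 > maxi
      · rw [if_pos hL, ih mid hi (by omega) hb.2 _ _]
        by_cases hc : (pvBest lo mid).1 ≥ (pvBest mid hi).1
        · rw [if_pos hc, if_neg (by omega), if_pos (by omega)]
        · rw [if_neg hc, if_pos (by omega), if_pos (by omega)]
      · rw [if_neg hL, ih mid hi (by omega) hb.2 maxi res]
        by_cases hc : (pvBest lo mid).1 ≥ (pvBest mid hi).1
        · rw [if_pos hc, if_neg (by omega), if_neg (by omega)]
        · rw [if_neg hc]

-- ===== VERDICT (by name: the statement is the Claim_ definition above) =====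
theorem altitude_record_spec : Claim_equal_altitude_record := by
  intro m _
  unfold Spec_altitude_record altitude_record altitude_record_alt
  by_cases hm : m < 1
  · rw [PySem.List.pyRange_one_eq_nil (by omega), if_pos hm]
    simp
  · rw [if_neg hm]
    have hlt : (1 : Int) < m + 1 := by omega
    rw [pvFold_best (m + 1 - 1).toNat 1 (m + 1) le_rfl hlt 1 1]
    obtain ⟨hle, htie⟩ := pvBest_lo (m + 1 - 1).toNat 1 (m + 1) le_rfl hlt
    have h1 : altitude_max 1 = 1 := by decide
    by_cases hc : (pvBest 1 (m + 1)).1 > 1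
    · rw [if_pos hc]
    · rw [if_neg hc]
      rw [htie (by omega), h1]
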